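-- pv_equiv track=rewrite | github.com/xhh66654/Operator_Development | refactored/core/base_operator.py | _build_seq_value_keys
-- ===== SOURCE A (Python) =====
-- def _build_seq_value_keys(max_items: int = 50) -> list[str]:
--     """
--     生成 first_value/second_value/... 的序号槽位 key 列表（支持到 fiftieth_value）。
--     用于后端统一从 config 里读出“按位置”的多段输入。
--     """
--     unit_words = {
--         1: "first",
--         2: "second",
--         3: "third",
--         4: "fourth",
--         5: "fifth",
--         6: "sixth",
--         7: "seventh",
--         8: "eighth",
--         9: "ninth",
--     }
--     teen_words = {
--         11: "eleventh",
--         12: "twelfth",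
--         13: "thirteenth",
--         14: "fourteenth",
--         15: "fifteenth",
--         16: "sixteenth",
--         17: "seventeenth",
--         18: "eighteenth",
--         19: "nineteenth",
--     }
--     tens_words = {
--         10: "tenth",
--         20: "twentieth",
--         30: "thirtieth",
--         40: "fortieth",
--         50: "fiftieth",
--     }
--
--     keys: list[str] = []
--     for n in range(1, int(max_items) + 1):
--         if n in unit_words:
--             word = unit_words[n]
--         elif n in teen_words:
--             word = teen_words[n]
--         elif n in tens_words:
--             word = tens_words[n]
--         elif 21 <= n <= 29:
--             word = "twenty_" + unit_words[n - 20]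
--         elif 31 <= n <= 39:
--             word = "thirty_" + unit_words[n - 30]
--         elif 41 <= n <= 49:
--             word = "forty_" + unit_words[n - 40]
--         else:
--             # 目前仅要求到 50；超出范围明确失败，避免静默生成错误 key
--             raise ValueError(f"unsupported seq value slot: {n}")
--         keys.append(f"{word}_value")
--     return keys
-- ===== SOURCE B (Python) =====
-- def _build_seq_value_keys(max_items: int = 50) -> list[str]:
--     m = int(max_items)
--     if m > 50:
--         raise ValueError(f"unsupported seq value slot: {m}")
--     units = ["first", "second", "third", "fourth", "fifth",
--              "sixth", "seventh", "eighth", "ninth"]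
--     words = units + ["tenth",
--                      "eleventh", "twelfth", "thirteenth", "fourteenth", "fifteenth",
--                      "sixteenth", "seventeenth", "eighteenth", "nineteenth"]
--     for card, ordw in [("twenty", "twentieth"), ("thirty", "thirtieth"),
--                        ("forty", "fortieth")]:
--         words.append(ordw)
--         words.extend(card + "_" + u for u in units)
--     words.append("fiftieth")
--     return [w + "_value" for w in words[:max(m, 0)]]
-- ===== Notes on version B (the rewrite author's own statement) =====
-- stated objective: alternative
-- what changed: Instead of classifying each n with a chain of dict-membership and range branches inside the loop, B builds the complete 50-word ordinal table once by staged list concatenation (units, teens, then each decade generated as ordinal + 'card_unit' products) and returns a slice of it suffixed with '_value'.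
import Mathlib
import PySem

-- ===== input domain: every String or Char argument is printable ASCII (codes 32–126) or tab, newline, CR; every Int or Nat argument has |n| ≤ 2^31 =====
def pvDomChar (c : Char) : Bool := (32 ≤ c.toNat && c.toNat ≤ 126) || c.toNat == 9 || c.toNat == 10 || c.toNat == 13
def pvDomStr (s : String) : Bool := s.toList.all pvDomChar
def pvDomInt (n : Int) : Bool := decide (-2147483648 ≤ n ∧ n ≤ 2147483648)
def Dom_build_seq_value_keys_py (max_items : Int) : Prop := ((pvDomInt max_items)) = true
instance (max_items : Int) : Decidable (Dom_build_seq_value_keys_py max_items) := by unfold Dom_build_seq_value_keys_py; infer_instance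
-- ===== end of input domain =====

-- B replaces A's per-n branch classification by building the full 50-word ordinal
-- table once through staged list concatenation and slicing it (objective: alternative).

-- ===== PORT A =====
def pvUnitWords : PySem.Dict Int String := PySem.Dict.ofList
  [(1, "first"), (2, "second"), (3, "third"), (4, "fourth"), (5, "fifth"),
   (6, "sixth"), (7, "seventh"), (8, "eighth"), (9, "ninth")]
def pvTeenWords : PySem.Dict Int String := PySem.Dict.ofList
  [(11, "eleventh"), (12, "twelfth"), (13, "thirteenth"), (14, "fourteenth"),
   (15, "fifteenth"), (16, "sixteenth"), (17, "seventeenth"), (18, "eighteenth"),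
   (19, "nineteenth")]
def pvTensWords : PySem.Dict Int String := PySem.Dict.ofList
  [(10, "tenth"), (20, "twentieth"), (30, "thirtieth"), (40, "fortieth"), (50, "fiftieth")]

def build_seq_value_keys_py (max_items : Int) : List String :=
  (PySem.List.pyRange 1 (max_items + 1) 1).foldl (fun keys n =>
    let word :=
      match pvUnitWords.get? n with
      | some w => w
      | none =>
        match pvTeenWords.get? n with
        | some w => w
        | none =>
          match pvTensWords.get? n with
          | some w => w
          | none =>
            if 21 ≤ n ∧ n ≤ 29 then "twenty_" ++ pvUnitWords.getD (n - 20) ""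
            else if 31 ≤ n ∧ n ≤ 39 then "thirty_" ++ pvUnitWords.getD (n - 30) ""
            else if 41 ≤ n ∧ n ≤ 49 then "forty_" ++ pvUnitWords.getD (n - 40) ""
            else ""  -- Python raises ValueError here; excluded by Pre_
    keys ++ [word ++ "_value"]) []

-- ===== PORT B =====
def pvUnitsB : List String :=
  ["first", "second", "third", "fourth", "fifth", "sixth", "seventh", "eighth", "ninth"]

-- the staged construction of the full word table, as in Source B
def pvWordsB : List String :=
  ([("twenty", "twentieth"), ("thirty", "thirtieth"), ("forty", "fortieth")].foldl
    (fun ws (p : String × String) =>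
      (ws ++ [p.2]) ++ pvUnitsB.map (fun u => p.1 ++ "_" ++ u))
    (pvUnitsB ++ ["tenth",
      "eleventh", "twelfth", "thirteenth", "fourteenth", "fifteenth",
      "sixteenth", "seventeenth", "eighteenth", "nineteenth"])) ++ ["fiftieth"]

def build_seq_value_keys_py_alt (max_items : Int) : List String :=
  -- 'if m > 50: raise ValueError' in Source B; excluded by Pre_
  (PySem.List.slice pvWordsB none (some (max max_items 0))).map (fun w => w ++ "_value")

-- ===== PRECONDITION & SPEC =====
-- A raises ValueError as soon as the loop passes the supported range, i.e. whenever max_items exceeds 50.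
def Pre_build_seq_value_keys_py (max_items : Int) : Prop := max_items ≤ 50
instance (max_items : Int) : Decidable (Pre_build_seq_value_keys_py max_items) := by
  unfold Pre_build_seq_value_keys_py; infer_instance
def pvWitness_build_seq_value_keys_py : Int := 50

def Spec_build_seq_value_keys_py (max_items : Int) (out : List String) : Prop :=
  out = build_seq_value_keys_py_alt max_items
instance (max_items : Int) (out : List String) : Decidable (Spec_build_seq_value_keys_py max_items out) := by
  unfold Spec_build_seq_value_keys_py; infer_instance

-- ===== CLAIM (what is proved, stated in full; the proofs are below) =====
def Claim_equal_build_seq_value_keys_py : Prop := ∀ (max_items : Int), Dom_build_seq_value_keys_py max_items → Pre_build_seq_value_keys_py max_items → Spec_build_seq_value_keys_py max_items (build_seq_value_keys_py max_items)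

-- ===== LEMMAS AND PROOFS =====
theorem build_seq_value_keys_py_spec : Claim_equal_build_seq_value_keys_py := by
  intro m _ hpre
  unfold Pre_build_seq_value_keys_py at hpre
  unfold Spec_build_seq_value_keys_py
  by_cases h : m ≤ 0
  · have hr : PySem.List.pyRange 1 (m + 1) 1 = [] :=
      PySem.List.pyRange_one_eq_nil (by omega)
    have hmax : max m 0 = 0 := by omega
    simp only [build_seq_value_keys_py, build_seq_value_keys_py_alt, hr, hmax,
      List.foldl_nil]
    decide
  · interval_cases m <;> rfl
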